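-- pv_equiv track=rewrite | github.com/maglili/neetcode-submissions-shdan7v6 | Data Structures & Algorithms/top-k-elements-in-list/submission-2.py | find_small_pos
-- ===== SOURCE A (Python) =====
-- def find_small_pos(arr):
--     small_idx = 0
--     small_num = arr[0]
--     for i in range(len(arr)):
--         if i == 0:
--             continue
--         if arr[i] < small_num:
--             small_num = arr[i]
--             small_idx = i
--     return small_idx
-- ===== SOURCE B (Python) =====
-- def find_small_pos(arr):
--     return arr.index(min(arr))
-- ===== Notes on version B (the rewrite author's own statement) =====
-- stated objective: idiomatic
-- what changed: B replaces A's manual index-tracking scan with two builtin passes: compute m = min(arr), then return arr.index(m) (first occurrence, matching A's tie-breaking).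
import Mathlib
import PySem

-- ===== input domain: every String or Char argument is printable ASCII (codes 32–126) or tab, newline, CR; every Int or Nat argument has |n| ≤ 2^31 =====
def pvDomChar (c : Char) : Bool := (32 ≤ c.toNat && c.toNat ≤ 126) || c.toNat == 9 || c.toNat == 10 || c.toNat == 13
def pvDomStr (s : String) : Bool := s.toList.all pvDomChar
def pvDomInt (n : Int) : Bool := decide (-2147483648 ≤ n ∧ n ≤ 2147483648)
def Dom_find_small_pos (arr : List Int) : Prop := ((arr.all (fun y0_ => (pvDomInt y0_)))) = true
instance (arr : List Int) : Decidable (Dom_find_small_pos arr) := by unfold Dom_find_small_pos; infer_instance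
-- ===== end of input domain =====

-- B replaces A's manual index-tracking scan with two builtin passes (min, then first index);
-- same O(n) cost, idiomatic. Pre_ excludes [] where A raises IndexError (B raises ValueError).


-- ===== PORT A =====
-- small_idx = 0; small_num = arr[0]; for i in range(len(arr)): skip i==0; strict-< update; return small_idx
def find_small_pos (arr : List Int) : Int :=
  match arr with
  | [] => 0   -- Python A raises IndexError at arr[0]; excluded by Pre_
  | a0 :: _ =>
    ((PySem.List.pyRange 0 (PySem.List.len arr) 1).foldl
      (fun (s : Int × Int) i =>
        if i == 0 then s
        else if PySem.List.pyGetD arr i 0 < s.2 then (i, PySem.List.pyGetD arr i 0) else s)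
      (0, a0)).1

-- ===== PORT B =====
-- return arr.index(min(arr))
def find_small_pos_alt (arr : List Int) : Int :=
  match PySem.List.min? arr (fun x => x) with
  | none => 0   -- Python min([]) raises ValueError; excluded by Pre_
  | some m => ((PySem.List.index? arr m).getD 0 : Nat)

-- ===== PRECONDITION & SPEC =====
-- Pre_ excludes only the empty list, on which both Pythons raise (A: IndexError, B: ValueError).
def Pre_find_small_pos (arr : List Int) : Prop := arr ≠ []
instance (arr : List Int) : Decidable (Pre_find_small_pos arr) := by unfold Pre_find_small_pos; infer_instance
def pvWitness_find_small_pos : List Int := [3, 1, 2, 1]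

def Spec_find_small_pos (arr : List Int) (out : Int) : Prop := out = find_small_pos_alt arr
instance (arr : List Int) (out : Int) : Decidable (Spec_find_small_pos arr out) := by unfold Spec_find_small_pos; infer_instance

-- ===== CLAIM (what is proved, stated in full; the proofs are below) =====
def Claim_equal_find_small_pos : Prop := ∀ (arr : List Int), Dom_find_small_pos arr → Pre_find_small_pos arr → Spec_find_small_pos arr (find_small_pos arr)

-- ===== LEMMAS AND PROOFS =====

-- the strict-< argmin fold over an enumerated suffix, characterised by (running min, first index reaching it)
theorem fold_char (rest : List Int) : ∀ (k j m : Int),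
    List.foldl (fun (s : Int × Int) (p : Int × Int) => if p.2 < s.2 then p else s) (j, m)
      (PySem.List.enumerate rest k)
    = if rest.foldl min m < m
      then (k + (((PySem.List.index? rest (rest.foldl min m)).getD 0 : Nat) : Int), rest.foldl min m)
      else (j, m) := by
  induction rest with
  | nil => intro k j m; simp
  | cons v rest ih =>
    intro k j m
    rw [PySem.List.enumerate_cons]
    simp only [List.foldl_cons]
    by_cases hv : v < m
    · simp only [if_pos hv]
      rw [ih (k+1) k v]
      rw [min_eq_right (le_of_lt hv)]
      have hle : rest.foldl min v ≤ v := (PySem.List.foldl_min_le rest v).1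
      by_cases hlt : rest.foldl min v < v
      · have hm : rest.foldl min v < m := lt_trans hlt hv
        rw [if_pos hlt, if_pos hm]
        have hmem : rest.foldl min v ∈ rest := by
          rcases PySem.List.foldl_min_mem rest v with h | h
          · exact absurd h (ne_of_lt hlt)
          · exact h
        obtain ⟨n, hn⟩ := Option.isSome_iff_exists.mp
          ((PySem.List.index?_isSome_iff rest (rest.foldl min v)).mpr hmem)
        have hne : v ≠ rest.foldl min v := (ne_of_lt hlt).symm
        rw [PySem.List.index?_cons_of_ne _ hne, hn]
        simp [Option.getD]
        ring
      · have heq : rest.foldl min v = v := le_antisymm hle (not_lt.mp hlt)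
        rw [if_neg hlt, heq, if_pos hv]
        rw [PySem.List.index?_cons_self]
        simp
    · simp only [if_neg hv]
      rw [ih (k+1) j m]
      rw [min_eq_left (not_lt.mp hv)]
      by_cases hlt : rest.foldl min m < m
      · rw [if_pos hlt, if_pos hlt]
        have hmem : rest.foldl min m ∈ rest := by
          rcases PySem.List.foldl_min_mem rest m with h | h
          · exact absurd h (ne_of_lt hlt)
          · exact h
        obtain ⟨n, hn⟩ := Option.isSome_iff_exists.mp
          ((PySem.List.index?_isSome_iff rest (rest.foldl min m)).mpr hmem)
        have hne : v ≠ rest.foldl min m := by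
          intro h; exact absurd (h ▸ hlt) (not_lt.mpr (not_lt.mp hv))
        rw [PySem.List.index?_cons_of_ne _ hne, hn]
        simp [Option.getD]
        ring
      · rw [if_neg hlt, if_neg hlt]

-- ===== VERDICT (by name: the statement is the Claim_ definition above) =====
theorem find_small_pos_spec : Claim_equal_find_small_pos := by
  intro arr _ hpre
  unfold Spec_find_small_pos
  match arr, hpre with
  | a0 :: rest, _ =>
    unfold find_small_pos find_small_pos_alt
    simp only [PySem.List.min?_id_cons]
    -- turn the pyRange fold into an enumerate fold
    have hA : (PySem.List.pyRange 0 (PySem.List.len (a0 :: rest)) 1).foldl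
        (fun (s : Int × Int) i =>
          if i == 0 then s
          else if PySem.List.pyGetD (a0 :: rest) i 0 < s.2 then (i, PySem.List.pyGetD (a0 :: rest) i 0) else s)
        (0, a0)
        = (PySem.List.enumerate (a0 :: rest) 0).foldl
        (fun (s : Int × Int) (p : Int × Int) =>
          if p.1 == 0 then s else if p.2 < s.2 then (p.1, p.2) else s) (0, a0) := by
      rw [PySem.List.enumerate_eq_map_pyRange (a0 :: rest) (d := 0), List.foldl_map]
    rw [hA, PySem.List.enumerate_cons]
    simp only [List.foldl_cons, beq_self_eq_true, if_pos]
    -- inside enumerate rest 1 the index is never 0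
    have hcong : List.foldl
        (fun (s : Int × Int) (p : Int × Int) =>
          if p.1 == 0 then s else if p.2 < s.2 then (p.1, p.2) else s) (0, a0)
        (PySem.List.enumerate rest 1)
        = List.foldl (fun (s : Int × Int) (p : Int × Int) => if p.2 < s.2 then p else s) (0, a0)
        (PySem.List.enumerate rest 1) := by
      apply PySem.List.foldl_congr_mem
      intro s p hp
      obtain ⟨kk, hk, hpk⟩ := (PySem.List.mem_enumerate_iff _ _ _).mp hp
      have : p.1 ≠ 0 := by rw [hpk]; simp; omega
      simp [this]
    rw [show (0:Int)+1 = 1 from rfl, hcong, fold_char rest 1 0 a0]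
    have hle : rest.foldl min a0 ≤ a0 := (PySem.List.foldl_min_le rest a0).1
    by_cases hlt : rest.foldl min a0 < a0
    · rw [if_pos hlt]
      have hmem : rest.foldl min a0 ∈ rest := by
        rcases PySem.List.foldl_min_mem rest a0 with h | h
        · exact absurd h (ne_of_lt hlt)
        · exact h
      obtain ⟨n, hn⟩ := Option.isSome_iff_exists.mp
        ((PySem.List.index?_isSome_iff rest (rest.foldl min a0)).mpr hmem)
      have hne : a0 ≠ rest.foldl min a0 := (ne_of_lt hlt).symm
      rw [PySem.List.index?_cons_of_ne _ hne, hn]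
      simp [Option.getD]
      ring
    · rw [if_neg hlt]
      have heq : rest.foldl min a0 = a0 := le_antisymm hle (not_lt.mp hlt)
      rw [heq, PySem.List.index?_cons_self]
      simp
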